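-- pv_equiv track=rewrite | github.com/idlutz/protein-backbone-MCTS | util/npose_util.py | npose_helix_elements
-- ===== SOURCE A (Python) =====
-- import itertools
--
-- def npose_helix_elements(is_helix):
--     ss_elements = []
--
--     offset = 0
--     ilabel = -1
--     for label, group in itertools.groupby(is_helix):
--         ilabel += 1
--         this_len = sum(1 for _ in group)
--         next_offset = offset + this_len
--
--         ss_elements.append( (label, offset, next_offset-1))
--
--         offset = next_offset
--     return ss_elements
-- ===== SOURCE B (Python) =====
-- def npose_helix_elements(is_helix):
--     xs = list(is_helix)
--     n = len(xs)
--     starts = [i for i in range(n) if i == 0 or xs[i] != xs[i - 1]]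
--     ends = [s - 1 for s in starts[1:]] + ([n - 1] if xs else [])
--     return [(xs[s], s, e) for s, e in zip(starts, ends)]
-- ===== Notes on version B (the rewrite author's own statement) =====
-- stated objective: alternative
-- what changed: B replaces the groupby-and-count fold with a staged boundary-index computation: it materializes the input, collects all run-start indices via a comprehension over range(n), derives end indices from the shifted start list, and zips starts with ends.
import Mathlib
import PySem

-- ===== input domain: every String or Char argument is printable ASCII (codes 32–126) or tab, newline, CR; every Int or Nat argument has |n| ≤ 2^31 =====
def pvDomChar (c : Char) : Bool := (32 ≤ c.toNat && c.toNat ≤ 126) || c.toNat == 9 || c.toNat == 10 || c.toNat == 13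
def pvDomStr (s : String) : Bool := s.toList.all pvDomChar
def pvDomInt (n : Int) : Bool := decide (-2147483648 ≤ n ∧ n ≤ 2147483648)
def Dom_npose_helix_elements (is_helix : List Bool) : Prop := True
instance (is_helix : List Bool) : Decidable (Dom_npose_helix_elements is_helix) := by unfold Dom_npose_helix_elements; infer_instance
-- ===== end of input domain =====

-- B replaces A's groupby-and-count fold with a staged computation of run-start boundary
-- indices followed by pairing starts with derived ends; same return value (alternative).

-- ===== PORT A =====
-- itertools.groupby on a list of Bool: consecutive runs as (label, group elements)
def pvTakeRun (b : Bool) : List Bool → List Bool × List Bool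
  | [] => ([], [])
  | x :: xs =>
    if x = b then
      let p := pvTakeRun b xs
      (x :: p.1, p.2)
    else ([], x :: xs)

theorem pvTakeRun_len (b : Bool) (xs : List Bool) : (pvTakeRun b xs).2.length ≤ xs.length := by
  induction xs with
  | nil => simp [pvTakeRun]
  | cons x xs ih =>
    simp only [pvTakeRun]
    split
    · simpa using Nat.le_succ_of_le ih
    · simp

def pvGroupby : List Bool → List (Bool × List Bool)
  | [] => []
  | x :: xs =>
    let p := pvTakeRun x xs
    (x, x :: p.1) :: pvGroupby p.2
  termination_by l => l.length
  decreasing_by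
    simpa using Nat.lt_succ_of_le (pvTakeRun_len x xs)

-- literal port of A's loop over the groups: state (ss_elements, offset, ilabel)
def npose_helix_elements (is_helix : List Bool) : List (Bool × Int × Int) :=
  ((pvGroupby is_helix).foldl
    (fun (st : List (Bool × Int × Int) × Int × Int) lg =>
      let ss := st.1
      let offset := st.2.1
      let ilabel := st.2.2 + 1
      let this_len : Int := lg.2.length
      let next_offset := offset + this_len
      (ss ++ [(lg.1, offset, next_offset - 1)], next_offset, ilabel))
    ([], 0, -1)).1

-- ===== PORT B =====
-- Source B's `starts` comprehension; `xs[i]`/`xs[i-1]` are ported with getD, exact here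
-- because the comprehension only reads indices 0 ≤ i-1 < i < len(xs)
def pvStarts (xs : List Bool) : List Nat :=
  (List.range xs.length).filter
    (fun i => i == 0 || decide (xs.getD i false ≠ xs.getD (i - 1) false))

def npose_helix_elements_alt (is_helix : List Bool) : List (Bool × Int × Int) :=
  let n := is_helix.length
  let starts := pvStarts is_helix
  let ends : List Int :=
    starts.tail.map (fun s => (s : Int) - 1) ++
      (if is_helix.isEmpty then [] else [(n : Int) - 1])
  (starts.zip ends).map
    (fun se => (is_helix.getD se.1 false, (se.1 : Int), se.2))

-- ===== PRECONDITION & SPEC =====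
def Spec_npose_helix_elements (is_helix : List Bool) (out : List (Bool × Int × Int)) : Prop := out = npose_helix_elements_alt is_helix
instance (is_helix : List Bool) (out : List (Bool × Int × Int)) : Decidable (Spec_npose_helix_elements is_helix out) := by unfold Spec_npose_helix_elements; infer_instance

-- ===== CLAIM (what is proved, stated in full; the proofs are below) =====
def Claim_equal_npose_helix_elements : Prop := ∀ (is_helix : List Bool), Dom_npose_helix_elements is_helix → Spec_npose_helix_elements is_helix (npose_helix_elements is_helix)

-- ===== LEMMAS AND PROOFS =====

-- canonical form of A's fold: segments of the group list starting at a given offset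
def pvFoldRuns : List (Bool × List Bool) → Int → List (Bool × Int × Int)
  | [], _ => []
  | (b, g) :: gs, offset =>
    (b, offset, offset + (g.length : Int) - 1) :: pvFoldRuns gs (offset + (g.length : Int))

theorem pvFold_eq_foldRuns (gs : List (Bool × List Bool)) (acc : List (Bool × Int × Int))
    (offset il : Int) :
    (gs.foldl
      (fun (st : List (Bool × Int × Int) × Int × Int) lg =>
        let ss := st.1
        let offset := st.2.1
        let ilabel := st.2.2 + 1
        let this_len : Int := lg.2.length
        let next_offset := offset + this_len
        (ss ++ [(lg.1, offset, next_offset - 1)], next_offset, ilabel))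
      (acc, offset, il)).1 = acc ++ pvFoldRuns gs offset := by
  induction gs generalizing acc offset il with
  | nil => simp [pvFoldRuns]
  | cons g gs ih =>
    obtain ⟨b, gl⟩ := g
    simp [pvFoldRuns, List.foldl_cons, ih]

theorem pvFoldRuns_shift (gs : List (Bool × List Bool)) (o d : Int) :
    pvFoldRuns gs (o + d) = (pvFoldRuns gs o).map (fun t => (t.1, t.2.1 + d, t.2.2 + d)) := by
  induction gs generalizing o with
  | nil => simp [pvFoldRuns]
  | cons g gs ih =>
    obtain ⟨b, gl⟩ := g
    simp only [pvFoldRuns, List.map_cons]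
    refine congrArg₂ _ (by simp [Prod.ext_iff]; omega) ?_
    rw [show o + d + (gl.length : Int) = (o + gl.length) + d by ring, ih]

-- takeRun facts
theorem pvTakeRun_append (b : Bool) (xs : List Bool) :
    (pvTakeRun b xs).1 ++ (pvTakeRun b xs).2 = xs := by
  induction xs with
  | nil => simp [pvTakeRun]
  | cons x xs ih =>
    simp only [pvTakeRun]
    split
    · simpa using ih
    · simp

theorem pvTakeRun_all (b : Bool) (xs : List Bool) :
    ∀ y ∈ (pvTakeRun b xs).1, y = b := by
  induction xs with
  | nil => simp [pvTakeRun]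
  | cons x xs ih =>
    simp only [pvTakeRun]
    split
    · next h =>
      intro y hy
      simp only at hy
      rcases List.mem_cons.1 hy with h' | h'
      · exact h'.trans h
      · exact ih y h'
    · next h => intro y hy; simp at hy

theorem pvTakeRun_head (b : Bool) (xs : List Bool) :
    ∀ c cs, (pvTakeRun b xs).2 = c :: cs → c ≠ b := by
  induction xs with
  | nil => simp [pvTakeRun]
  | cons x xs ih =>
    simp only [pvTakeRun]
    split
    · exact ih
    · next h => intro c cs hc; cases hc; exact h

-- pvStarts of a nonempty list begins with 0
theorem pvStarts_cons (y : Bool) (ys : List Bool) :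
    ∃ T, pvStarts (y :: ys) = 0 :: T := by
  simp only [pvStarts, List.length_cons, List.range_succ_eq_map, List.filter_cons,
    beq_self_eq_true, Bool.true_or, if_true]
  exact ⟨_, rfl⟩

-- the boundary lemma: a leading constant run contributes exactly the start index 0
theorem pvStarts_run (b : Bool) (run rest : List Bool) (hne : run ≠ [])
    (hall : ∀ y ∈ run, y = b) (hhead : ∀ c cs, rest = c :: cs → c ≠ b) :
    pvStarts (run ++ rest) = 0 :: (pvStarts rest).map (· + run.length) := by
  have hk : 0 < run.length := List.length_pos_iff.2 hne
  have hrun : ∀ i, i < run.length → (run ++ rest).getD i false = b := by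
    intro i h
    rw [List.getD_append _ _ _ _ h, List.getD_eq_getElem _ _ h]
    exact hall _ (List.getElem_mem h)
  have hgetR : ∀ j : Nat, (run ++ rest).getD (run.length + j) false = rest.getD j false := by
    intro j
    rw [List.getD_append_right _ _ _ _ (Nat.le_add_right _ _), Nat.add_sub_cancel_left]
  unfold pvStarts
  rw [List.length_append, List.range_add, List.filter_append]
  have hleft : (List.range run.length).filter
      (fun i => i == 0 || decide ((run ++ rest).getD i false ≠ (run ++ rest).getD (i - 1) false))
      = [0] := by
    obtain ⟨k', hk'⟩ : ∃ k', run.length = k' + 1 := ⟨run.length - 1, by omega⟩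
    have hfalse : ∀ j ∈ List.range k',
        ¬ ((fun i => i == 0 || decide ((run ++ rest).getD i false ≠ (run ++ rest).getD (i - 1) false))
            ∘ Nat.succ) j = true := by
      intro j hj
      have hj' : j + 1 < run.length := by
        have := List.mem_range.1 hj; omega
      have e1 := hrun (j + 1) hj'
      have e2 := hrun j (by omega)
      simp only [Function.comp_apply, Nat.succ_eq_add_one, Nat.add_sub_cancel, e1, e2]
      simp
    rw [hk', List.range_succ_eq_map, List.filter_cons, List.filter_map,
      List.filter_eq_nil_iff.2 hfalse, List.map_nil]
    simp
  have hright : ((List.range rest.length).map (run.length + ·)).filter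
      (fun i => i == 0 || decide ((run ++ rest).getD i false ≠ (run ++ rest).getD (i - 1) false))
      = ((List.range rest.length).filter
          (fun i => i == 0 || decide (rest.getD i false ≠ rest.getD (i - 1) false))).map
        (· + run.length) := by
    rw [List.filter_map]
    have hcong : (List.range rest.length).filter
        ((fun i => i == 0 || decide ((run ++ rest).getD i false ≠ (run ++ rest).getD (i - 1) false))
          ∘ (run.length + ·))
        = (List.range rest.length).filter
          (fun i => i == 0 || decide (rest.getD i false ≠ rest.getD (i - 1) false)) := by
      apply List.filter_congr
      intro j hj
      have hjm : j < rest.length := List.mem_range.1 hj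
      cases j with
      | zero =>
        obtain ⟨c, cs, hcc⟩ : ∃ c cs, rest = c :: cs := by
          cases rest with
          | nil => simp at hjm
          | cons c cs => exact ⟨c, cs, rfl⟩
        have hc : rest.getD 0 false ≠ b := by
          rw [hcc]; exact hhead c cs hcc
        have h2 : (run ++ rest).getD (run.length + 0) false = rest.getD 0 false := hgetR 0
        have h3 : (run ++ rest).getD (run.length + 0 - 1) false = b :=
          hrun _ (by omega)
        simp only [Function.comp_apply, h2, h3]
        have h1 : ((run.length + 0) == 0) = false := by simp [hne]
        rw [h1]
        have hd : decide (rest.getD 0 false ≠ b) = true := decide_eq_true hc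
        rw [hd]
        simp
      | succ j =>
        have h2 : (run ++ rest).getD (run.length + (j + 1)) false = rest.getD (j + 1) false :=
          hgetR (j + 1)
        have h3 : (run ++ rest).getD (run.length + (j + 1) - 1) false = rest.getD j false := by
          have e : run.length + (j + 1) - 1 = run.length + j := by omega
          rw [e]; exact hgetR j
        have h4 : rest.getD (j + 1 - 1) false = rest.getD j false := by norm_num
        simp only [Function.comp_apply, h2, h3, h4]
        simp
    rw [hcong]
    apply List.map_congr_left
    intro a _
    omega
  rw [hleft, hright]
  rfl

-- the zip in B, reshaped as a recursion on the start list
def pvPairs : Nat → List Nat → Int → List (Nat × Int)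
  | s0, [], e => [(s0, e)]
  | s0, s1 :: S, e => (s0, (s1 : Int) - 1) :: pvPairs s1 S e

theorem pvZip_pairs (s0 : Nat) (S : List Nat) (e : Int) :
    (s0 :: S).zip (S.map (fun s => (s : Int) - 1) ++ [e]) = pvPairs s0 S e := by
  induction S generalizing s0 with
  | nil => simp [pvPairs]
  | cons s1 S ih =>
    simp only [List.map_cons, List.cons_append, List.zip_cons_cons, pvPairs]
    exact congrArg _ (ih s1)

theorem pvPairs_shift (s0 : Nat) (S : List Nat) (e : Int) (k : Nat) :
    pvPairs (s0 + k) (S.map (· + k)) (e + k) =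
      (pvPairs s0 S e).map (fun p => (p.1 + k, p.2 + (k : Int))) := by
  induction S generalizing s0 with
  | nil => simp [pvPairs]
  | cons s1 S ih => simp [pvPairs, ih]; ring

-- B over a leading run
theorem pvAlt_step (b : Bool) (run rest : List Bool) (hne : run ≠ [])
    (hall : ∀ y ∈ run, y = b) (hhead : ∀ c cs, rest = c :: cs → c ≠ b) :
    npose_helix_elements_alt (run ++ rest) =
      (b, 0, (run.length : Int) - 1) ::
        (npose_helix_elements_alt rest).map
          (fun t => (t.1, t.2.1 + (run.length : Int), t.2.2 + (run.length : Int))) := by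
  have hk : 0 < run.length := List.length_pos_iff.2 hne
  have hb0 : (run ++ rest).getD 0 false = b := by
    rw [List.getD_append _ _ _ _ hk, List.getD_eq_getElem _ _ hk]
    exact hall _ (List.getElem_mem hk)
  have hgetR : ∀ j : Nat, (run ++ rest).getD (j + run.length) false = rest.getD j false := by
    intro j
    rw [List.getD_append_right _ _ _ _ (Nat.le_add_left _ _), Nat.add_sub_cancel]
  have hstarts := pvStarts_run b run rest hne hall hhead
  have hEmpty : (run ++ rest).isEmpty = false := by
    simp [hne]
  cases rest with
  | nil =>
    have hS : pvStarts ([] : List Bool) = [] := by simp [pvStarts]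
    rw [hS, List.map_nil] at hstarts
    have hz : npose_helix_elements_alt (run ++ []) =
        [((run ++ []).getD 0 false, (0 : Int), ((run ++ []).length : Int) - 1)] := by
      simp only [npose_helix_elements_alt, hstarts, hEmpty, Bool.false_eq_true, if_false,
        List.tail_cons, List.map_nil, List.nil_append]
      rfl
    have halt : npose_helix_elements_alt [] = [] := rfl
    rw [hz, hb0, halt, List.map_nil]
    simp
  | cons c cs =>
    obtain ⟨T, hT⟩ := pvStarts_cons c cs
    rw [hT] at hstarts
    simp only [List.map_cons, Nat.zero_add] at hstarts
    simp only [npose_helix_elements_alt, hstarts, hT, hEmpty, List.isEmpty_cons,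
      Bool.false_eq_true, if_false, List.tail_cons, List.map_cons, List.cons_append,
      List.zip_cons_cons]
    rw [pvZip_pairs, pvZip_pairs]
    have hn : ((run ++ c :: cs).length : Int) - 1
        = (((c :: cs).length : Int) - 1) + (run.length : Int) := by
      simp [List.length_append]; ring
    rw [hn]
    have hshift := pvPairs_shift 0 T (((c :: cs).length : Int) - 1) run.length
    rw [Nat.zero_add] at hshift
    rw [pvPairs, hshift]
    simp only [List.map_cons, List.map_map]
    refine congrArg₂ _ ?_ ?_
    · rw [hb0]
      simp
    · apply List.map_congr_left
      intro p _
      simp only [Function.comp_apply]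
      rw [hgetR p.1]
      push_cast
      simp

theorem pvAlt_eq_foldRuns (xs : List Bool) :
    npose_helix_elements_alt xs = pvFoldRuns (pvGroupby xs) 0 := by
  induction hn : xs.length using Nat.strong_induction_on generalizing xs with
  | _ n ih =>
    subst hn
    cases xs with
    | nil => simp [npose_helix_elements_alt, pvStarts, pvGroupby, pvFoldRuns]
    | cons x t =>
      have hdec := pvTakeRun_append x t
      have hrun : (x :: (pvTakeRun x t).1) ++ (pvTakeRun x t).2 = x :: t := by
        simpa using congrArg (x :: ·) hdec
      have hall : ∀ y ∈ x :: (pvTakeRun x t).1, y = x := by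
        intro y hy
        rcases List.mem_cons.1 hy with h | h
        · exact h
        · exact pvTakeRun_all x t y h
      have hstep := pvAlt_step x (x :: (pvTakeRun x t).1) (pvTakeRun x t).2
        (by simp) hall (pvTakeRun_head x t)
      rw [hrun] at hstep
      rw [hstep]
      have hlt : (pvTakeRun x t).2.length < (x :: t).length := by
        simpa using Nat.lt_succ_of_le (pvTakeRun_len x t)
      rw [ih _ hlt _ rfl]
      show _ = pvFoldRuns (pvGroupby (x :: t)) 0
      rw [pvGroupby]
      simp only [pvFoldRuns]
      refine congrArg₂ _ (by simp) ?_
      rw [show ((0 : Int) + ((x :: (pvTakeRun x t).1).length : Int))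
            = 0 + ((x :: (pvTakeRun x t).1).length : Int) from rfl]
      rw [pvFoldRuns_shift]

-- ===== VERDICT (by name: the statement is the Claim_ definition above) =====
theorem npose_helix_elements_spec : Claim_equal_npose_helix_elements := by
  intro is_helix _
  show _ = _
  unfold npose_helix_elements
  rw [pvFold_eq_foldRuns, pvAlt_eq_foldRuns]
  simp
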